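-- pv_equiv track=rewrite | github.com/LuoYiCheng/Business-Programming | hw05-Q3.py | find_next_new
-- ===== SOURCE A (Python) =====
-- def find_next_new(unvisited, dst, cur):
--     '''consider next two loc, find the minimun sum dst
--     and return the next loc and dst'''
--     if len(unvisited) == 1:
--         next_loc = unvisited[0]
--         min_dst = dst[next_loc][cur]
--     else:
--         next_loc = -1
--         min_total_dst = 999
--         for next1 in unvisited:
--             for next2 in filter(lambda x: x != next1, unvisited):
--                 if dst[cur][next1] + dst[next1][next2] < min_total_dst:
--                     next_loc = next1
--                     min_total_dst = dst[cur][next1] + dst[next1][next2]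
--                     min_dst = dst[cur][next1]
--     return next_loc, min_dst
-- ===== SOURCE B (Python) =====
-- def find_next_new(unvisited, dst, cur):
--     '''sort-based rewrite: list each candidate's two-hop total, keep those under the
--     999 cap, stable-sort by total, and take the head of the sorted list'''
--     if len(unvisited) == 1:
--         next_loc = unvisited[0]
--         return next_loc, dst[next_loc][cur]
--     cands = [(dst[cur][n1] + min(dst[n1][n2] for n2 in unvisited if n2 != n1),
--               n1, dst[cur][n1])
--              for n1 in unvisited if any(n2 != n1 for n2 in unvisited)]
--     good = [c for c in cands if c[0] < 999]
--     good.sort(key=lambda c: c[0])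
--     total, next_loc, min_dst = good[0]
--     return next_loc, min_dst
-- ===== Notes on version B (the rewrite author's own statement) =====
-- stated objective: alternative
-- what changed: A's nested loops keeping a running minimum over all (next1,next2) pairs are replaced by a pipeline: build the list of per-candidate two-hop totals, filter it by the 999 cap, stable-sort it by total, and return the head of the sorted list (stability preserves A's first-wins tie-break).
import Mathlib
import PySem

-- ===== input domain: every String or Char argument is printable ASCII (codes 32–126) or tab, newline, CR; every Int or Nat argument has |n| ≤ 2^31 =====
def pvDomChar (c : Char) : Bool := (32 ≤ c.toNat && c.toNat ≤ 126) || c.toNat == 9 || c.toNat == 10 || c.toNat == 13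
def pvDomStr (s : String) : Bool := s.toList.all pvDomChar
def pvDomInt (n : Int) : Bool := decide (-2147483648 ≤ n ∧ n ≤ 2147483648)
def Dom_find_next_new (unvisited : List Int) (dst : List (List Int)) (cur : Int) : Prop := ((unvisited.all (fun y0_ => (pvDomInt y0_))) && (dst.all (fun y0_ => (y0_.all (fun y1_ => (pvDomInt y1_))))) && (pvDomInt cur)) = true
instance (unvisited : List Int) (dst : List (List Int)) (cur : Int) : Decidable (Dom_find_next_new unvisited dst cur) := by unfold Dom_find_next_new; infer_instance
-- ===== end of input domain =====

-- B replaces A's nested running-minimum pair scan by a pipeline: candidate totals list, filter by the 999 cap, stable sort by total, take the head; same cost, different algorithm shape.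


-- Shared indexing helpers: dst[i] and row[j] via PySem.List.pyGet?; the .getD defaults are
-- unreachable under Pre_ (which demands isSome exactly where the Python indexes).
def pvRow (dst : List (List Int)) (i : Int) : List Int := (PySem.List.pyGet? dst i).getD []
def pvCell (row : List Int) (j : Int) : Int := (PySem.List.pyGet? row j).getD 0
def pvD2 (dst : List (List Int)) (i j : Int) : Int := pvCell (pvRow dst i) j

-- ===== PORT A =====
-- inner 'for next2 in filter(...)' body; min_dst is Option Int (Python leaves it unbound until the first update)
def pvInnerA (dst : List (List Int)) (cur n1 : Int) (st : Int × Int × Option Int) (n2 : Int) : Int × Int × Option Int :=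
  if pvD2 dst cur n1 + pvD2 dst n1 n2 < st.2.1 then
    (n1, pvD2 dst cur n1 + pvD2 dst n1 n2, some (pvD2 dst cur n1))
  else st

-- outer 'for next1 in unvisited' body
def pvOuterA (unvisited : List Int) (dst : List (List Int)) (cur : Int) (st : Int × Int × Option Int) (n1 : Int) : Int × Int × Option Int :=
  (unvisited.filter (fun x => x != n1)).foldl (pvInnerA dst cur n1) st

def find_next_new (unvisited : List Int) (dst : List (List Int)) (cur : Int) : Int × Int :=
  if unvisited.length = 1 then
    let next_loc := (PySem.List.pyGet? unvisited 0).getD 0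
    (next_loc, pvD2 dst next_loc cur)
  else
    let st := unvisited.foldl (pvOuterA unvisited dst cur) ((-1 : Int), (999 : Int), (none : Option Int))
    (st.1, st.2.2.getD 0)   -- 'return next_loc, min_dst'; getD unreachable under Pre_ (else it is UnboundLocalError)

-- ===== PORT B =====
-- one comprehension entry: (total, n1, first hop); the inner min's .getD 0 is unreachable
-- because the comprehension's 'if any(...)' guard makes the partner list nonempty
def pvEntryB (unvisited : List Int) (dst : List (List Int)) (cur : Int) (n1 : Int) : Int × Int × Int :=
  (pvD2 dst cur n1 +
     (PySem.List.min? ((unvisited.filter (fun n2 => n2 != n1)).map (fun n2 => pvD2 dst n1 n2)) (fun y => y)).getD 0,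
   n1, pvD2 dst cur n1)

def find_next_new_alt (unvisited : List Int) (dst : List (List Int)) (cur : Int) : Int × Int :=
  if unvisited.length = 1 then
    let next_loc := (PySem.List.pyGet? unvisited 0).getD 0
    (next_loc, pvD2 dst next_loc cur)
  else
    let cands := (unvisited.filter (fun n1 => unvisited.any (fun n2 => n2 != n1))).map (pvEntryB unvisited dst cur)
    let good := cands.filter (fun c => c.1 < 999)
    let sortedGood := PySem.List.sorted good (fun c => c.1) false
    let c := (PySem.List.pyGet? sortedGood 0).getD (0, 0, 0)   -- 'good[0]'; getD unreachable under Pre_ (else it is IndexError)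
    (c.2.1, c.2.2)

-- ===== PRECONDITION & SPEC =====
-- Pre_ holds exactly where the Python A returns normally: every index it evaluates is in range,
-- and (in the multi-candidate branch) some pair beats the 999 sentinel so min_dst gets assigned.
def Pre_find_next_new (unvisited : List Int) (dst : List (List Int)) (cur : Int) : Prop :=
  if unvisited.length = 1 then
    ∀ n ∈ unvisited, (PySem.List.pyGet? dst n).isSome = true ∧ (PySem.List.pyGet? (pvRow dst n) cur).isSome = true
  else
    (∀ n1 ∈ unvisited, (∃ n2 ∈ unvisited, n2 ≠ n1) →
      (PySem.List.pyGet? dst cur).isSome = true ∧ (PySem.List.pyGet? (pvRow dst cur) n1).isSome = true ∧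
      (PySem.List.pyGet? dst n1).isSome = true ∧
      ∀ n2 ∈ unvisited, n2 ≠ n1 → (PySem.List.pyGet? (pvRow dst n1) n2).isSome = true)
    ∧ (∃ n1 ∈ unvisited, ∃ n2 ∈ unvisited, n2 ≠ n1 ∧ pvD2 dst cur n1 + pvD2 dst n1 n2 < 999)
instance (unvisited : List Int) (dst : List (List Int)) (cur : Int) : Decidable (Pre_find_next_new unvisited dst cur) := by unfold Pre_find_next_new; infer_instance

def pvWitness_find_next_new : List Int × List (List Int) × Int :=
  ([0, 1], ([[0, 1, 2], [1, 0, 3], [2, 3, 0]], 2))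

def Spec_find_next_new (unvisited : List Int) (dst : List (List Int)) (cur : Int) (out : Int × Int) : Prop := out = find_next_new_alt unvisited dst cur
instance (unvisited : List Int) (dst : List (List Int)) (cur : Int) (out : Int × Int) : Decidable (Spec_find_next_new unvisited dst cur out) := by unfold Spec_find_next_new; infer_instance

-- ===== CLAIM (what is proved, stated in full; the proofs are below) =====
def Claim_equal_find_next_new : Prop := ∀ (unvisited : List Int) (dst : List (List Int)) (cur : Int), Dom_find_next_new unvisited dst cur → Pre_find_next_new unvisited dst cur → Spec_find_next_new unvisited dst cur (find_next_new unvisited dst cur)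

-- ===== LEMMAS AND PROOFS =====

-- the common reading of both programs' main loop: keep the FIRST candidate of minimal total
def pvMinStep (m : Option (Int × Int × Int)) (c : Int × Int × Int) : Option (Int × Int × Int) :=
  match m with
  | none => some c
  | some m' => if c.1 < m'.1 then some c else some m'

def pvG (m : Option (Int × Int × Int)) : Int × Int × Option Int :=
  match m with
  | none => (-1, 999, none)
  | some c => (c.2.1, c.1, some c.2.2)

theorem pv_foldl_min_min (l : List Int) (a b : Int) :
    l.foldl min (min a b) = min a (l.foldl min b) := by
  induction l generalizing b with
  | nil => rfl
  | cons x t ih => simpa [List.foldl, min_assoc] using ih (min b x)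

-- A's inner strict-improvement loop over a nonempty candidate list is a single
-- compare-against-the-minimum step
theorem pv_inner_eq (dst : List (List Int)) (cur n1 : Int) (x : Int) (l : List Int)
    (st : Int × Int × Option Int) :
    (x :: l).foldl (pvInnerA dst cur n1) st =
      (let m := pvD2 dst cur n1 + (l.map (fun n2 => pvD2 dst n1 n2)).foldl min (pvD2 dst n1 x)
       if m < st.2.1 then (n1, m, some (pvD2 dst cur n1)) else st) := by
  induction l generalizing x st with
  | nil => simp [List.foldl, pvInnerA]
  | cons y t ih =>
    have h1 : ((y :: t).map (fun n2 => pvD2 dst n1 n2)).foldl min (pvD2 dst n1 x)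
        = min (pvD2 dst n1 x) ((t.map (fun n2 => pvD2 dst n1 n2)).foldl min (pvD2 dst n1 y)) := by
      simp [pv_foldl_min_min]
    have h2 : (x :: y :: t).foldl (pvInnerA dst cur n1) st
        = (y :: t).foldl (pvInnerA dst cur n1) (pvInnerA dst cur n1 st x) := rfl
    rw [h2, ih]
    simp only [h1, pvInnerA]
    split_ifs with hx hm hm' hm'' <;> simp_all <;> omega

-- A's outer loop is the pvMinStep fold (first minimum wins) over the candidate list,
-- restricted to the totals that beat the 999 sentinel
theorem pv_outer_to_cands (unvisited : List Int) (dst : List (List Int)) (cur : Int)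
    (l : List Int) (st : Int × Int × Option Int) :
    l.foldl (pvOuterA unvisited dst cur) st
      = (((l.filter (fun n1 => unvisited.any (fun n2 => n2 != n1))).map (pvEntryB unvisited dst cur)).foldl
          (fun s c => if c.1 < s.2.1 then (c.2.1, c.1, some c.2.2) else s) st) := by
  induction l generalizing st with
  | nil => rfl
  | cons n1 t ih =>
    cases hp : unvisited.filter (fun x => x != n1) with
    | nil =>
      have hg : unvisited.any (fun n2 => n2 != n1) = false := by
        rw [List.any_eq_false]
        intro a ha
        have := List.filter_eq_nil_iff.mp hp a ha
        simpa using this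
      have hA : pvOuterA unvisited dst cur st n1 = st := by simp [pvOuterA, hp]
      simp only [List.foldl_cons, hA, List.filter_cons, hg]
      exact ih st
    | cons x p =>
      have hg : unvisited.any (fun n2 => n2 != n1) = true := by
        rw [List.any_eq_true]
        have hx : x ∈ unvisited.filter (fun z => z != n1) := by rw [hp]; exact List.mem_cons_self
        have hx' := List.mem_filter.mp hx
        exact ⟨x, hx'.1, hx'.2⟩
      have hA : pvOuterA unvisited dst cur st n1 =
          (let m := pvD2 dst cur n1 + (p.map (fun n2 => pvD2 dst n1 n2)).foldl min (pvD2 dst n1 x)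
           if m < st.2.1 then (n1, m, some (pvD2 dst cur n1)) else st) := by
        unfold pvOuterA
        rw [hp, pv_inner_eq]
      have hE : pvEntryB unvisited dst cur n1 =
          (pvD2 dst cur n1 + (p.map (fun n2 => pvD2 dst n1 n2)).foldl min (pvD2 dst n1 x), n1, pvD2 dst cur n1) := by
        unfold pvEntryB
        rw [hp]
        simp [PySem.List.min?_id_cons]
      simp only [List.foldl_cons, hA, List.filter_cons, hg, if_pos, List.map_cons, hE]
      exact ih _
  
-- the sentinel fold from (-1, 999, unbound) is pvG of the first-minimum fold over the
-- sub-list of totals below 999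
theorem pv_stepA_min (cs : List (Int × Int × Int)) (m : Option (Int × Int × Int))
    (hm : ∀ c, m = some c → c.1 < 999) :
    cs.foldl (fun s c => if c.1 < s.2.1 then (c.2.1, c.1, some c.2.2) else s) (pvG m)
      = pvG ((cs.filter (fun c => c.1 < 999)).foldl pvMinStep m) := by
  induction cs generalizing m with
  | nil => rfl
  | cons c t ih =>
    by_cases h : c.1 < 999
    · have hstep : (if c.1 < (pvG m).2.1 then (c.2.1, c.1, some c.2.2) else pvG m) = pvG (pvMinStep m c) := by
        cases m with
        | none => simp [pvG, pvMinStep, h]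
        | some m' => simp only [pvG, pvMinStep]; split_ifs <;> rfl
      have hm' : ∀ c', pvMinStep m c = some c' → c'.1 < 999 := by
        intro c' hc'
        cases m with
        | none =>
          injection hc' with hh2
          subst hh2; exact h
        | some m'' =>
          have h999 := hm m'' rfl
          simp only [pvMinStep] at hc'
          split_ifs at hc' with hl
          · injection hc' with hh2; subst hh2; exact h
          · injection hc' with hh2; subst hh2; exact h999
      simp only [List.foldl_cons, hstep, List.filter_cons, decide_eq_true h, if_pos]
      exact ih _ hm'
    · have hstep : (if c.1 < (pvG m).2.1 then (c.2.1, c.1, some c.2.2) else pvG m) = pvG m := by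
        cases m with
        | none => simp [pvG]; omega
        | some m' =>
          have := hm m' rfl
          simp only [pvG]
          rw [if_neg (by omega)]
      have hfil : ((c :: t).filter (fun c => c.1 < 999)) = t.filter (fun c => c.1 < 999) := by
        simp [h]
      simp only [List.foldl_cons, hstep, hfil]
      exact ih m hm
  
-- head of PySem's stable insertion sort = the first element of minimal key
theorem pv_head_foldl_insertBy (xs acc : List (Int × Int × Int)) :
    (xs.foldl (fun a x => PySem.List.insertBy (fun a b => decide (a.1 < b.1)) x a) acc).head?
      = xs.foldl pvMinStep acc.head? := by
  induction xs generalizing acc with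
  | nil => rfl
  | cons x t ih =>
    simp only [List.foldl_cons]
    rw [ih]
    congr 1
    cases acc with
    | nil => simp [PySem.List.insertBy, pvMinStep]
    | cons y ys =>
      simp only [PySem.List.insertBy, List.head?, pvMinStep]
      split_ifs <;> simp_all


-- pyGet? at 0 is head?
theorem pv_pyGet?_zero {α : Type} (xs : List α) : PySem.List.pyGet? xs (0 : Int) = xs.head? := by
  cases xs <;> simp [PySem.List.pyGet?, PySem.List.pyIdx?]

-- the two Lean ports agree under Pre_
theorem pv_ports_eq (unvisited : List Int) (dst : List (List Int)) (cur : Int)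
    (hpre : Pre_find_next_new unvisited dst cur) :
    find_next_new unvisited dst cur = find_next_new_alt unvisited dst cur := by
  unfold find_next_new find_next_new_alt
  by_cases hlen : unvisited.length = 1
  · simp [hlen]
  · rw [if_neg hlen, if_neg hlen]
    rw [Pre_find_next_new, if_neg hlen] at hpre
    obtain ⟨-, n1, hn1, n2, hn2, hne, hlt⟩ := hpre
    -- the candidate list and its sub-999 part
    set cands := (unvisited.filter (fun n1 => unvisited.any (fun n2 => n2 != n1))).map (pvEntryB unvisited dst cur) with hcands
    set good := cands.filter (fun c => c.1 < 999) with hgood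
    -- A's fold = pvG (first minimum of good)
    have hA : unvisited.foldl (pvOuterA unvisited dst cur) ((-1 : Int), (999 : Int), (none : Option Int))
        = pvG (good.foldl pvMinStep none) := by
      have h0 : ((-1 : Int), (999 : Int), (none : Option Int)) = pvG none := rfl
      rw [h0, pv_outer_to_cands, pv_stepA_min _ none (by intro c h; cases h)]
    -- good is nonempty: n1's entry has total < 999
    have hgmem : pvEntryB unvisited dst cur n1 ∈ good := by
      have hcand : pvEntryB unvisited dst cur n1 ∈ cands := by
        rw [hcands]
        refine List.mem_map.mpr ⟨n1, ?_, rfl⟩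
        refine List.mem_filter.mpr ⟨hn1, ?_⟩
        rw [List.any_eq_true]
        exact ⟨n2, hn2, by simpa using hne⟩
      have hn2p : pvD2 dst n1 n2 ∈ (unvisited.filter (fun z => z != n1)).map (fun z => pvD2 dst n1 z) := by
        refine List.mem_map.mpr ⟨n2, List.mem_filter.mpr ⟨hn2, by simpa using hne⟩, rfl⟩
      obtain ⟨mv, hmv⟩ : ∃ mv, PySem.List.min? ((unvisited.filter (fun z => z != n1)).map (fun z => pvD2 dst n1 z)) (fun y => y) = some mv := by
        cases hm : PySem.List.min? ((unvisited.filter (fun z => z != n1)).map (fun z => pvD2 dst n1 z)) (fun y => y) with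
        | none =>
          rw [PySem.List.min?_eq_none_iff] at hm
          rw [hm] at hn2p
          simp at hn2p
        | some mv => exact ⟨mv, rfl⟩
      have hle : mv ≤ pvD2 dst n1 n2 := PySem.List.min?_isMin hmv _ hn2p
      have htot : (pvEntryB unvisited dst cur n1).1 < 999 := by
        unfold pvEntryB
        simp only [hmv, Option.getD_some]
        omega
      exact List.mem_filter.mpr ⟨hcand, by simpa using htot⟩
    -- head of the sorted good list = the first minimum the sentinel fold finds
    have hsort : (PySem.List.sorted good (fun c => c.1) false).head? = good.foldl pvMinStep none := by
      rw [PySem.List.sorted_eq_foldl_insertBy]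
      exact pv_head_foldl_insertBy good []
    have hsne : PySem.List.sorted good (fun c => c.1) false ≠ [] := by
      rw [Ne, PySem.List.sorted_eq_nil_iff]
      exact List.ne_nil_of_mem hgmem
    obtain ⟨c, t, hct⟩ := List.exists_cons_of_ne_nil hsne
    have hfold : good.foldl pvMinStep none = some c := by
      rw [← hsort, hct]; rfl
    have hB : (PySem.List.pyGet? (PySem.List.sorted good (fun c => c.1) false) 0).getD ((0 : Int), (0 : Int), (0 : Int)) = c := by
      rw [pv_pyGet?_zero, hct]; rfl
    simp only [hA, hfold, pvG]
    rw [← hgood, hB]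
    rfl
-- ===== VERDICT (by name: the statement is the Claim_ definition above) =====
theorem find_next_new_spec : Claim_equal_find_next_new := by
  intro unvisited dst cur _ hpre
  exact pv_ports_eq unvisited dst cur hpre
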